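-- pv_equiv track=rewrite | github.com/harnen/p2p-service-discovery | service-discovery/simulator_python/modelling.py | generate_IPs
-- ===== SOURCE A (Python) =====
-- def flip(b):
--     assert(b == '0' or b == '1')
--     if (b == '0'):
--         return '1'
--     return '0'
--
-- def generate_IPs(n):
--     ips = []
--     init_ip = list('1'*32)
--     for i in range(0, n):
--         for j in range(0, len(init_ip)):
--             if((i % (2**j)) == 0):
--                 init_ip[j] = flip(init_ip[j])
--
--         ip_str = ''
--         for octet in range(0, 4):
--             offset = octet*8
--             octet_str = str(int(''.join(init_ip[offset:offset + 8]), 2))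
--             ip_str  = ip_str + '.' + octet_str
--         #remove the first '.'
--         ips.append(ip_str[1:])
--     return ips
-- ===== SOURCE B (Python) =====
-- def generate_IPs(n):
--     # Each IP is a pure function of its index i: after iteration i of A's
--     # flip loop, position j holds bit j of i; position 8*o is octet o's MSB.
--     return ['.'.join(str(sum(((i >> (8 * o + k)) & 1) << (7 - k)
--                              for k in range(8)))
--                      for o in range(4))
--             for i in range(n)]
-- ===== Notes on version B (the rewrite author's own statement) =====
-- stated objective: simpler
-- what changed: Replaced A's stateful flip-counter (which mutates a character array across iterations and reparses its slices with a base-two int()) by a stateless closed form: each octet of an IP is computed directly from the binary digits of its index, so no state is carried between iterations.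
import Mathlib
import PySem

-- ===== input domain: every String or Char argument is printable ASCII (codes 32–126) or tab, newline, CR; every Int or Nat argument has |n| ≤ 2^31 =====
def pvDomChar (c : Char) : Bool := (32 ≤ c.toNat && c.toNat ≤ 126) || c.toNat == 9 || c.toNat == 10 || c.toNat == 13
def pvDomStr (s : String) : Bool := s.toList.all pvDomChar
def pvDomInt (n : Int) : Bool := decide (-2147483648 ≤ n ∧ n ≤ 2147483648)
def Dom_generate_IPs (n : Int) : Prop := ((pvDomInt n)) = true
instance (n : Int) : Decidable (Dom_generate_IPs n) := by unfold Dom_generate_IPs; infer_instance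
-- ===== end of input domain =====

-- B replaces A's stateful bit-flip counter by a stateless closed form (each IP is a
-- pure function of its index i); objective: simpler. Return values only; no mutation.

-- ===== PORT A =====
def pyFlip (b : String) : String :=
  -- the assert never fires on reachable states (entries are always "0"/"1")
  if b == "0" then "1" else "0"

-- inner loop body: 'if i % (2**j) == 0: init_ip[j] = flip(init_ip[j])'
-- (j ≥ 0 always, so Python's 2**j is 2 ^ j.toNat; index j is always in range)
def flipStep (i : Int) (ip : List String) (j : Int) : List String :=
  if PySem.Int.mod i (2 ^ j.toNat) == 0 then
    PySem.List.pySetD ip j (pyFlip (PySem.List.pyGetD ip j "")) else ip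

def innerLoop (i : Int) (ip : List String) : List String :=
  (PySem.List.pyRange 0 (PySem.List.len ip) 1).foldl (flipStep i) ip

-- octet_str = str(int(''.join(init_ip[offset:offset+8]), 2)); int() never raises
-- here (the slice is 8 chars of '0'/'1'), so the Option is discharged with getD 0
def octetStr (ip : List String) (octet : Int) : String :=
  PySem.Int.toStr ((PySem.Int.ofStrBase?
    (PySem.Str.join "" (PySem.List.slice ip (some (octet * 8)) (some (octet * 8 + 8)))) 2).getD 0)

def buildIP (ip : List String) : String :=
  PySem.Str.slice
    ((PySem.List.pyRange 0 4 1).foldl (fun s octet => s ++ "." ++ octetStr ip octet) "")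
    (some 1) none

def generate_IPs (n : Int) : List String :=
  ((PySem.List.pyRange 0 n 1).foldl
    (fun (st : List String × List String) i =>
      let ip := innerLoop i st.2
      (st.1 ++ [buildIP ip], ip))
    ([], List.replicate 32 "1")).1

-- ===== PORT B =====
-- sum(((i >> (8*o+k)) & 1) << (7-k) for k in range(8)); shift amounts are ≥ 0
def altOctet (i o : Int) : Int :=
  ((PySem.List.pyRange 0 8 1).map
    (fun k => (PySem.Int.band (i >>> (8 * o + k).toNat) 1) <<< (7 - k).toNat)).sum

def generate_IPs_alt (n : Int) : List String :=
  (PySem.List.pyRange 0 n 1).map (fun i =>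
    PySem.Str.join "." ((PySem.List.pyRange 0 4 1).map
      (fun o => PySem.Int.toStr (altOctet i o))))

-- ===== PRECONDITION & SPEC =====
def Spec_generate_IPs (n : Int) (out : List String) : Prop := out = generate_IPs_alt n
instance (n : Int) (out : List String) : Decidable (Spec_generate_IPs n out) := by unfold Spec_generate_IPs; infer_instance

-- ===== CLAIM (what is proved, stated in full; the proofs are below) =====
def Claim_equal_generate_IPs : Prop := ∀ (n : Int), Dom_generate_IPs n → Spec_generate_IPs n (generate_IPs n)

-- ===== LEMMAS AND PROOFS =====



def bitb (i : Int) (j : Nat) : Bool := decide (i >>> j % 2 = 1)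

def bchr (b : Bool) : String := if b then "1" else "0"

def bitsL (i : Int) : List String := (List.range 32).map (fun j => bchr (bitb i j))

lemma neg_one_shiftRight (j : Nat) : (-1 : Int) >>> j = -1 := by
  show Int.shiftRight (Int.negSucc 0) j = Int.negSucc 0
  simp [Int.shiftRight]

lemma bitsL_start : (List.replicate 32 "1") = bitsL (-1) := by
  decide

lemma natCast_shiftRight (a j : Nat) : ((a : Int) >>> j) = ((a >>> j : Nat) : Int) := rfl

lemma nat_bit_dvd (a j : Nat) (ha : 1 ≤ a) (h : 2^j ∣ a) :
    a >>> j % 2 = 1 - (a-1) >>> j % 2 ∧ (a-1) >>> j % 2 ≤ 1 := by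
  obtain ⟨q, rfl⟩ := h
  have hp : 0 < 2^j := Nat.two_pow_pos j
  have hq : 1 ≤ q := by
    rcases Nat.eq_zero_or_pos q with rfl | hq
    · simp at ha
    · exact hq
  rw [Nat.shiftRight_eq_div_pow, Nat.shiftRight_eq_div_pow]
  have h1 : 2^j * q / 2^j = q := Nat.mul_div_cancel_left q hp
  have h2 : (2^j * q - 1) / 2^j = q - 1 := by
    have he : 2^j * q - 1 = (2^j - 1) + 2^j * (q - 1) := by
      cases q with
      | zero => omega
      | succ q' => rw [Nat.mul_succ, Nat.add_sub_cancel]; omega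
    rw [he, Nat.add_mul_div_left _ _ hp, Nat.div_eq_of_lt (by omega)]; omega
  rw [h1, h2]; omega

lemma nat_bit_ndvd (a j : Nat) (ha : 1 ≤ a) (h : ¬ 2^j ∣ a) :
    a >>> j % 2 = (a-1) >>> j % 2 := by
  have hp : 0 < 2^j := Nat.two_pow_pos j
  have hr : 1 ≤ a % 2^j := by
    rcases Nat.eq_zero_or_pos (a % 2^j) with h0 | h0
    · exact absurd (Nat.dvd_iff_mod_eq_zero.mpr h0) h
    · exact h0
  rw [Nat.shiftRight_eq_div_pow, Nat.shiftRight_eq_div_pow]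
  have hd := Nat.div_add_mod a (2^j)
  have hlt : a % 2^j < 2^j := Nat.mod_lt a hp
  have he : a - 1 = (a % 2^j - 1) + 2^j * (a / 2^j) := by omega
  have h2 : (a - 1) / 2^j = a / 2^j := by
    rw [he, Nat.add_mul_div_left _ _ hp, Nat.div_eq_of_lt (by omega)]; omega
  rw [h2]

lemma bit_step (i : Int) (hi : 0 ≤ i) (j : Nat) :
    (if (2 : Int) ^ j ∣ i then pyFlip (bchr (bitb (i - 1) j)) else bchr (bitb (i - 1) j))
      = bchr (bitb i j) := by
  by_cases h0 : i = 0
  · subst h0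
    rw [if_pos (dvd_zero _)]
    have h1 : bitb (0 - 1) j = true := by
      norm_num [bitb, neg_one_shiftRight]
    have h2 : bitb 0 j = false := by simp [bitb]
    rw [h1, h2]; rfl
  · obtain ⟨a, rfl⟩ : ∃ m : Nat, i = (m : Int) := ⟨i.toNat, (Int.toNat_of_nonneg hi).symm⟩
    have ha : 1 ≤ a := by omega
    have hb : ∀ m : Nat, bitb (m : Int) j = decide (m >>> j % 2 = 1) := by
      intro m
      simp only [bitb, natCast_shiftRight]
      rw [decide_eq_decide]
      omega
    have hc : ((a : Int) - 1) = ((a - 1 : Nat) : Int) := by omega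
    rw [hc, hb, hb]
    by_cases hd : 2 ^ j ∣ a
    · have hdi : (2 : Int) ^ j ∣ (a : Int) := by
        have := Int.natCast_dvd_natCast.mpr hd
        push_cast at this; exact this
      rw [if_pos hdi]
      obtain ⟨he, hle⟩ := nat_bit_dvd a j ha hd
      by_cases hy : (a - 1) >>> j % 2 = 1
      · have : a >>> j % 2 = 0 := by omega
        simp [hy, this, pyFlip, bchr]
      · have h1 : (a - 1) >>> j % 2 = 0 := by omega
        have h2 : a >>> j % 2 = 1 := by omega
        simp [h1, h2, pyFlip, bchr]
    · have hdi : ¬ (2 : Int) ^ j ∣ (a : Int) := by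
        intro hcon
        apply hd
        have : ((2^j : Nat) : Int) ∣ (a : Int) := by push_cast; exact hcon
        exact_mod_cast this
      rw [if_neg hdi, nat_bit_ndvd a j ha hd]

lemma innerFold (i : Int) (m : Nat) (bs : List String) (hm : m ≤ bs.length) :
    (PySem.List.pyRange 0 (m : Int) 1).foldl (flipStep i) bs
      = (List.range m).map
          (fun j => if (2 : Int) ^ j ∣ i then pyFlip (bs.getD j "") else bs.getD j "")
        ++ bs.drop m := by
  induction m with
  | zero => simp [PySem.List.pyRange_one_eq_nil]
  | succ m ih =>
    have hm' : m ≤ bs.length := by omega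
    have hlt : m < bs.length := by omega
    rw [show ((m + 1 : Nat) : Int) = (m : Int) + 1 by push_cast; rfl,
        PySem.List.pyRange_one_succ_right (by positivity), List.foldl_append, ih hm']
    have hlen : ((List.range m).map
        (fun j => if (2 : Int) ^ j ∣ i then pyFlip (bs.getD j "") else bs.getD j "")).length = m := by
      simp
    have hdrop : bs.drop m = bs[m] :: bs.drop (m + 1) := List.drop_eq_getElem_cons hlt
    have hget : (((List.range m).map
        (fun j => if (2 : Int) ^ j ∣ i then pyFlip (bs.getD j "") else bs.getD j ""))
          ++ bs.drop m).getD m "" = bs[m] := by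
      rw [List.getD_append_right _ _ _ _ (le_of_eq hlen), hlen, Nat.sub_self, hdrop]
      simp [List.getElem?_eq_getElem hlt]
    have hcond : (PySem.Int.mod i (2 ^ ((m : Int)).toNat) == 0) = decide ((2 : Int) ^ m ∣ i) := by
      rw [Bool.eq_iff_iff]
      simp [Int.toNat_natCast, PySem.Int.mod_eq_zero_iff_dvd, PySem.Int.emod_eq_zero_iff_dvd]
    simp only [List.foldl_cons, List.foldl_nil, flipStep, hcond]
    rw [List.range_succ, List.map_append, List.append_assoc]
    by_cases hd : (2 : Int) ^ m ∣ i
    · rw [if_pos (by simp [hd]), PySem.List.pySetD_natCast, PySem.List.pyGetD_natCast, hget]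
      rw [List.set_append_right _ _ (by omega), hlen, Nat.sub_self, hdrop,
          List.set_cons_zero]
      simp [hd, List.getD_eq_getElem?_getD, List.getElem?_eq_getElem hlt]
    · rw [if_neg (by simp [hd]), hdrop]
      simp [hd, List.getD_eq_getElem?_getD, List.getElem?_eq_getElem hlt]

lemma inner_spec (i : Int) (hi : 0 ≤ i) : innerLoop i (bitsL (i - 1)) = bitsL i := by
  unfold innerLoop
  have hlen : (bitsL (i - 1)).length = 32 := by simp [bitsL]
  rw [show PySem.List.len (bitsL (i - 1)) = ((32 : Nat) : Int) by simp [hlen],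
      innerFold i 32 _ (by omega)]
  rw [List.drop_eq_nil_of_le (by omega), List.append_nil]
  unfold bitsL
  apply List.map_congr_left
  intro j hj
  have hj32 : j < 32 := List.mem_range.mp hj
  have hget : (List.map (fun j => bchr (bitb (i - 1) j)) (List.range 32)).getD j ""
      = bchr (bitb (i - 1) j) := by
    rw [List.getD_eq_getElem?_getD]
    simp [List.getElem?_map, List.getElem?_range hj32]
  rw [hget]
  exact bit_step i hi j

set_option maxHeartbeats 1000000 in

lemma parse8 : ∀ (b0 b1 b2 b3 b4 b5 b6 b7 : Bool),
    (PySem.Int.ofStrBase?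
        (PySem.Str.join "" [bchr b0, bchr b1, bchr b2, bchr b3, bchr b4, bchr b5, bchr b6, bchr b7]) 2).getD 0
      = 128 * (cond b0 1 0) + 64 * (cond b1 1 0) + 32 * (cond b2 1 0) + 16 * (cond b3 1 0)
        + 8 * (cond b4 1 0) + 4 * (cond b5 1 0) + 2 * (cond b6 1 0) + (cond b7 1 0) := by
  decide

lemma term_eq (i : Int) (m : Nat) (s : Nat) :
    (PySem.Int.band (i >>> m) 1) <<< s = (cond (bitb i m) 1 0) * 2 ^ s := by
  have h1 : PySem.Int.band (i >>> m) 1 = (i >>> m) % 2 := by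
    rw [PySem.Int.band_one, PySem.Int.mod_eq_emod_of_pos (by norm_num)]
  have h2 : (i >>> m) % 2 = cond (bitb i m) 1 0 := by
    have hn := Int.emod_nonneg (i >>> m) (by norm_num : (2:Int) ≠ 0)
    have hl := Int.emod_lt_of_pos (i >>> m) (by norm_num : (0:Int) < 2)
    unfold bitb
    by_cases h : i >>> m % 2 = 1 <;> simp [h] <;> omega
  rw [h1, h2, Int.shiftLeft_eq]

lemma str_assembly (a b c d : String) :
    PySem.Str.slice ("" ++ "." ++ a ++ "." ++ b ++ "." ++ c ++ "." ++ d) (some 1) none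
      = PySem.Str.join "." [a, b, c, d] := by
  simp [PySem.Str.slice, PySem.Str.join, PySem.Chars.join,
    PySem.List.slice_from_one, List.intercalate, List.intersperse]

lemma hoct0 (i : Int) : octetStr (bitsL i) 0 = PySem.Int.toStr (altOctet i 0) := by
  have hsl : PySem.List.slice (bitsL i) (some (0 * 8)) (some (0 * 8 + 8)) = [bchr (bitb i 0), bchr (bitb i 1), bchr (bitb i 2), bchr (bitb i 3), bchr (bitb i 4), bchr (bitb i 5), bchr (bitb i 6), bchr (bitb i 7)] := by
    norm_num
    rw [PySem.List.slice_to _ (by norm_num)]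
    norm_num
    rfl
  have halt : altOctet i 0 = 128 * (cond (bitb i 0) 1 0) + 64 * (cond (bitb i 1) 1 0) + 32 * (cond (bitb i 2) 1 0) + 16 * (cond (bitb i 3) 1 0) + 8 * (cond (bitb i 4) 1 0) + 4 * (cond (bitb i 5) 1 0) + 2 * (cond (bitb i 6) 1 0) + (cond (bitb i 7) 1 0) := by
    unfold altOctet
    rw [show PySem.List.pyRange 0 8 1 = [0,1,2,3,4,5,6,7] from by decide]
    norm_num [term_eq]
    simp only [show (((0:Int)).toNat) = 0 from rfl, show (((1:Int)).toNat) = 1 from rfl, show (((2:Int)).toNat) = 2 from rfl, show (((3:Int)).toNat) = 3 from rfl, show (((4:Int)).toNat) = 4 from rfl, show (((5:Int)).toNat) = 5 from rfl, show (((6:Int)).toNat) = 6 from rfl, show (((7:Int)).toNat) = 7 from rfl, show (((8:Int)).toNat) = 8 from rfl, show (((9:Int)).toNat) = 9 from rfl, show (((10:Int)).toNat) = 10 from rfl, show (((11:Int)).toNat) = 11 from rfl, show (((12:Int)).toNat) = 12 from rfl, show (((13:Int)).toNat) = 13 from rfl, show (((14:Int)).toNat) = 14 from rfl, show (((15:Int)).toNat)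 = 15 from rfl, show (((16:Int)).toNat) = 16 from rfl, show (((17:Int)).toNat) = 17 from rfl, show (((18:Int)).toNat) = 18 from rfl, show (((19:Int)).toNat) = 19 from rfl, show (((20:Int)).toNat) = 20 from rfl, show (((21:Int)).toNat) = 21 from rfl, show (((22:Int)).toNat) = 22 from rfl, show (((23:Int)).toNat) = 23 from rfl, show (((24:Int)).toNat) = 24 from rfl, show (((25:Int)).toNat) = 25 from rfl, show (((26:Int)).toNat) = 26 from rfl, show (((27:Int)).toNat) = 27 from rfl, show (((28:Int)).toNat) = 28 from rfl, show (((29:Int)).toNat) = 29 from rfl, show (((30:Int)).toNat) = 30 from rfl, show (((31:Int)).toNat) = 31 from rfl]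
    ring
  unfold octetStr
  rw [hsl, parse8, halt]

lemma hoct1 (i : Int) : octetStr (bitsL i) 1 = PySem.Int.toStr (altOctet i 1) := by
  have hsl : PySem.List.slice (bitsL i) (some (1 * 8)) (some (1 * 8 + 8)) = [bchr (bitb i 8), bchr (bitb i 9), bchr (bitb i 10), bchr (bitb i 11), bchr (bitb i 12), bchr (bitb i 13), bchr (bitb i 14), bchr (bitb i 15)] := by
    norm_num
    rw [PySem.List.slice_toNat _ (by norm_num) (by norm_num)]
    norm_num
    rfl
  have halt : altOctet i 1 = 128 * (cond (bitb i 8) 1 0) + 64 * (cond (bitb i 9) 1 0) + 32 * (cond (bitb i 10) 1 0) + 16 * (cond (bitb i 11) 1 0) + 8 * (cond (bitb i 12) 1 0) + 4 * (cond (bitb i 13) 1 0) + 2 * (cond (bitb i 14) 1 0) + (cond (bitb i 15) 1 0) := by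
    unfold altOctet
    rw [show PySem.List.pyRange 0 8 1 = [0,1,2,3,4,5,6,7] from by decide]
    norm_num [term_eq]
    simp only [show (((0:Int)).toNat) = 0 from rfl, show (((1:Int)).toNat) = 1 from rfl, show (((2:Int)).toNat) = 2 from rfl, show (((3:Int)).toNat) = 3 from rfl, show (((4:Int)).toNat) = 4 from rfl, show (((5:Int)).toNat) = 5 from rfl, show (((6:Int)).toNat) = 6 from rfl, show (((7:Int)).toNat) = 7 from rfl, show (((8:Int)).toNat) = 8 from rfl, show (((9:Int)).toNat) = 9 from rfl, show (((10:Int)).toNat) = 10 from rfl, show (((11:Int)).toNat) = 11 from rfl, show (((12:Int)).toNat) = 12 from rfl, show (((13:Int)).toNat) = 13 from rfl, show (((14:Int)).toNat) = 14 from rfl, show (((15:Int)).toNat) = 15 from rfl, show (((16:Int)).toNat) = 16 from rfl, show (((17:Int)).toNat) = 17 from rfl, show (((18:Int)).toNat) = 18 from rfl, show (((19:Int)).toNat) = 19 from rfl, show (((20:Int)).toNat) = 20 from rfl, show (((21:Int)).toNat) = 21 from rfl, show (((22:Int)).toNat) = 22 from rfl, show (((23:Int)).toNat) = 23 from rfl,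 show (((24:Int)).toNat) = 24 from rfl, show (((25:Int)).toNat) = 25 from rfl, show (((26:Int)).toNat) = 26 from rfl, show (((27:Int)).toNat) = 27 from rfl, show (((28:Int)).toNat) = 28 from rfl, show (((29:Int)).toNat) = 29 from rfl, show (((30:Int)).toNat) = 30 from rfl, show (((31:Int)).toNat) = 31 from rfl]
    ring
  unfold octetStr
  rw [hsl, parse8, halt]

lemma hoct2 (i : Int) : octetStr (bitsL i) 2 = PySem.Int.toStr (altOctet i 2) := by
  have hsl : PySem.List.slice (bitsL i) (some (2 * 8)) (some (2 * 8 + 8)) = [bchr (bitb i 16), bchr (bitb i 17), bchr (bitb i 18), bchr (bitb i 19), bchr (bitb i 20), bchr (bitb i 21), bchr (bitb i 22), bchr (bitb i 23)] := by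
    norm_num
    rw [PySem.List.slice_toNat _ (by norm_num) (by norm_num)]
    norm_num
    rfl
  have halt : altOctet i 2 = 128 * (cond (bitb i 16) 1 0) + 64 * (cond (bitb i 17) 1 0) + 32 * (cond (bitb i 18) 1 0) + 16 * (cond (bitb i 19) 1 0) + 8 * (cond (bitb i 20) 1 0) + 4 * (cond (bitb i 21) 1 0) + 2 * (cond (bitb i 22) 1 0) + (cond (bitb i 23) 1 0) := by
    unfold altOctet
    rw [show PySem.List.pyRange 0 8 1 = [0,1,2,3,4,5,6,7] from by decide]
    norm_num [term_eq]
    simp only [show (((0:Int)).toNat) = 0 from rfl, show (((1:Int)).toNat) = 1 from rfl, show (((2:Int)).toNat) = 2 from rfl, show (((3:Int)).toNat) = 3 from rfl, show (((4:Int)).toNat) = 4 from rfl, show (((5:Int)).toNat) = 5 from rfl, show (((6:Int)).toNat) = 6 from rfl, show (((7:Int)).toNat) = 7 from rfl, show (((8:Int)).toNat) = 8 from rfl, show (((9:Int)).toNat) = 9 from rfl, show (((10:Int)).toNat) = 10 from rfl, show (((11:Int)).toNat) = 11 from rfl, show (((12:Int)).toNat) = 12 from rfl, show (((13:Int)).toNat)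 = 13 from rfl, show (((14:Int)).toNat) = 14 from rfl, show (((15:Int)).toNat) = 15 from rfl, show (((16:Int)).toNat) = 16 from rfl, show (((17:Int)).toNat) = 17 from rfl, show (((18:Int)).toNat) = 18 from rfl, show (((19:Int)).toNat) = 19 from rfl, show (((20:Int)).toNat) = 20 from rfl, show (((21:Int)).toNat) = 21 from rfl, show (((22:Int)).toNat) = 22 from rfl, show (((23:Int)).toNat) = 23 from rfl, show (((24:Int)).toNat) = 24 from rfl, show (((25:Int)).toNat) = 25 from rfl, show (((26:Int)).toNat) = 26 from rfl, show (((27:Int)).toNat) = 27 from rfl, show (((28:Int)).toNat) = 28 from rfl, show (((29:Int)).toNat) = 29 from rfl, show (((30:Int)).toNat) = 30 from rfl, show (((31:Int)).toNat) = 31 from rfl]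
    ring
  unfold octetStr
  rw [hsl, parse8, halt]

lemma hoct3 (i : Int) : octetStr (bitsL i) 3 = PySem.Int.toStr (altOctet i 3) := by
  have hsl : PySem.List.slice (bitsL i) (some (3 * 8)) (some (3 * 8 + 8)) = [bchr (bitb i 24), bchr (bitb i 25), bchr (bitb i 26), bchr (bitb i 27), bchr (bitb i 28), bchr (bitb i 29), bchr (bitb i 30), bchr (bitb i 31)] := by
    norm_num
    rw [PySem.List.slice_toNat _ (by norm_num) (by norm_num)]
    norm_num
    rfl
  have halt : altOctet i 3 = 128 * (cond (bitb i 24) 1 0) + 64 * (cond (bitb i 25) 1 0) + 32 * (cond (bitb i 26) 1 0) + 16 * (cond (bitb i 27) 1 0) + 8 * (cond (bitb i 28) 1 0) + 4 * (cond (bitb i 29) 1 0) + 2 * (cond (bitb i 30) 1 0) + (cond (bitb i 31) 1 0) := by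
    unfold altOctet
    rw [show PySem.List.pyRange 0 8 1 = [0,1,2,3,4,5,6,7] from by decide]
    norm_num [term_eq]
    simp only [show (((0:Int)).toNat) = 0 from rfl, show (((1:Int)).toNat) = 1 from rfl, show (((2:Int)).toNat) = 2 from rfl, show (((3:Int)).toNat) = 3 from rfl, show (((4:Int)).toNat) = 4 from rfl, show (((5:Int)).toNat) = 5 from rfl, show (((6:Int)).toNat) = 6 from rfl, show (((7:Int)).toNat) = 7 from rfl, show (((8:Int)).toNat) = 8 from rfl, show (((9:Int)).toNat) = 9 from rfl, show (((10:Int)).toNat) = 10 from rfl, show (((11:Int)).toNat) = 11 from rfl, show (((12:Int)).toNat) = 12 from rfl, show (((13:Int)).toNat) = 13 from rfl, show (((14:Int)).toNat) = 14 from rfl, show (((15:Int)).toNat) = 15 from rfl, show (((16:Int)).toNat) = 16 from rfl, show (((17:Int)).toNat) = 17 from rfl, show (((18:Int)).toNat) = 18 from rfl, show (((19:Int)).toNat) = 19 from rfl, show (((20:Int)).toNat) = 20 from rfl, show (((21:Int)).toNat) = 21 from rfl, show (((22:Int)).toNat) = 22 from rfl, show (((23:Int)).toNat) = 23 from rfl,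 show (((24:Int)).toNat) = 24 from rfl, show (((25:Int)).toNat) = 25 from rfl, show (((26:Int)).toNat) = 26 from rfl, show (((27:Int)).toNat) = 27 from rfl, show (((28:Int)).toNat) = 28 from rfl, show (((29:Int)).toNat) = 29 from rfl, show (((30:Int)).toNat) = 30 from rfl, show (((31:Int)).toNat) = 31 from rfl]
    ring
  unfold octetStr
  rw [hsl, parse8, halt]

lemma build_spec (i : Int) (hi : 0 ≤ i) :
    buildIP (bitsL i)
      = PySem.Str.join "." ((PySem.List.pyRange 0 4 1).map
          (fun o => PySem.Int.toStr (altOctet i o))) := by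
  have hr4 : PySem.List.pyRange 0 4 1 = [0, 1, 2, 3] := by decide
  unfold buildIP
  rw [hr4]
  simp only [List.foldl_cons, List.foldl_nil, List.map]
  rw [hoct0 i, hoct1 i, hoct2 i, hoct3 i]
  exact str_assembly _ _ _ _

lemma fold_inv (m : Nat) :
    (PySem.List.pyRange 0 (m : Int) 1).foldl
      (fun (st : List String × List String) i =>
        let ip := innerLoop i st.2
        (st.1 ++ [buildIP ip], ip))
      ([], bitsL (-1))
    = ((PySem.List.pyRange 0 (m : Int) 1).map (fun i =>
        PySem.Str.join "." ((PySem.List.pyRange 0 4 1).map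
          (fun o => PySem.Int.toStr (altOctet i o)))), bitsL ((m : Int) - 1)) := by
  induction m with
  | zero => simp [PySem.List.pyRange_one_eq_nil]
  | succ m ih =>
    rw [show ((m + 1 : Nat) : Int) = (m : Int) + 1 by push_cast; rfl,
        PySem.List.pyRange_one_succ_right (by positivity), List.foldl_append,
        List.map_append, ih]
    simp only [List.foldl_cons, List.foldl_nil, List.map_cons, List.map_nil]
    rw [inner_spec (m : Int) (by positivity), build_spec (m : Int) (by positivity)]
    norm_num

-- ===== VERDICT (by name: the statement is the Claim_ definition above) =====
theorem generate_IPs_spec : Claim_equal_generate_IPs := by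
  intro n _
  unfold Spec_generate_IPs generate_IPs generate_IPs_alt
  by_cases hn : 0 ≤ n
  · obtain ⟨m, rfl⟩ : ∃ m : Nat, n = (m : Int) := ⟨n.toNat, (Int.toNat_of_nonneg hn).symm⟩
    rw [bitsL_start, fold_inv]
  · rw [PySem.List.pyRange_one_eq_nil (by omega)]
    simp
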